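-- pv_equiv track=rewrite | github.com/magartrantit/Python-Cazan-Rares-2024 | Lab2_Ex/Pb3.py | convert
-- ===== SOURCE A (Python) =====
-- def convert(sir, nr):
--     L = len(sir)
--     result = 0
--     mult = 1
--     while nr > 0:
--         result += (nr % L) * mult
--         nr = nr // L
--         mult *= 10
--     return result
-- ===== SOURCE B (Python) =====
-- def convert(sir, nr):
--     L = len(sir)
--     digits = []
--     while nr > 0:
--         digits.append(nr % L)
--         nr //= L
--     result = 0
--     for d in reversed(digits):
--         result = result * 10 + d
--     return result
-- ===== Notes on version B (the rewrite author's own statement) =====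
-- stated objective: alternative
-- what changed: B splits A's single interleaved loop (accumulating result with a growing power-of-10 multiplier) into two passes: first collect the base-L remainders into a list, then fold the list most-significant-first with Horner's rule result*10+d.
import Mathlib
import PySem

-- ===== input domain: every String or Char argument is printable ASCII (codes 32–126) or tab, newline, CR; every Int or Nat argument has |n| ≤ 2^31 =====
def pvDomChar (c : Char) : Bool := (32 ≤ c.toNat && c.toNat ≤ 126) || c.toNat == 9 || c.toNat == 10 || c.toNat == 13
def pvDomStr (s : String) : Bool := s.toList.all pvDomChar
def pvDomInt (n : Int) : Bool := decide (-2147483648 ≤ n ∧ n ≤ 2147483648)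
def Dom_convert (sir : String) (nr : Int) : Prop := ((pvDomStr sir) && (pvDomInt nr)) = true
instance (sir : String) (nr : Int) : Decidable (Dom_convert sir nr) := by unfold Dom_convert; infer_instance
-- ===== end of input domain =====

-- B replaces A's single interleaved loop (result accumulated with a growing power-of-10 multiplier)
-- by two passes: collect the base-L remainders into a list, then fold it most-significant-first with Horner's rule.
-- Pre_convert excludes nr > 0 with len(sir) ≤ 1, where A raises ZeroDivisionError (len 0) or loops forever (len 1).

-- termination helper used by both loop ports
theorem pv_floordiv_toNat_lt (nr L : Int) (h1 : 0 < nr) (h2 : 2 ≤ L) :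
    (PySem.Int.floordiv nr L).toNat < nr.toNat := by
  have hlt : PySem.Int.floordiv nr L < nr :=
    (PySem.Int.floordiv_lt_iff_lt_mul (by omega)).mpr (by nlinarith)
  have hnn : 0 ≤ PySem.Int.floordiv nr L := by
    rw [PySem.Int.floordiv_eq_ediv_of_pos (by omega)]
    exact Int.ediv_nonneg (by omega) (by omega)
  omega

-- ===== PORT A =====
-- the while loop; the '2 ≤ L' conjunct is a totality guard only (Python raises or diverges there, outside Pre_)
def convertLoopA (L nr result mult : Int) : Int :=
  if h : 0 < nr ∧ 2 ≤ L then
    convertLoopA L (PySem.Int.floordiv nr L) (result + PySem.Int.mod nr L * mult) (mult * 10)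
  else result
termination_by nr.toNat
decreasing_by exact pv_floordiv_toNat_lt _ _ h.1 h.2

def convert (sir : String) (nr : Int) : Int :=
  convertLoopA (PySem.Str.len sir) nr 0 1

-- ===== PORT B =====
-- first pass: collect base-L digits, least significant first (same totality guard)
def digitsLoopB (L nr : Int) : List Int :=
  if h : 0 < nr ∧ 2 ≤ L then
    PySem.Int.mod nr L :: digitsLoopB L (PySem.Int.floordiv nr L)
  else []
termination_by nr.toNat
decreasing_by exact pv_floordiv_toNat_lt _ _ h.1 h.2

def convert_alt (sir : String) (nr : Int) : Int :=
  ((digitsLoopB (PySem.Str.len sir) nr).reverse).foldl (fun r d => r * 10 + d) 0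

-- ===== PRECONDITION & SPEC =====
-- excludes exactly nr > 0 with len(sir) ≤ 1: A raises ZeroDivisionError (empty sir) or never terminates (len 1)
def Pre_convert (sir : String) (nr : Int) : Prop := 0 < nr → 2 ≤ PySem.Str.len sir
instance (sir : String) (nr : Int) : Decidable (Pre_convert sir nr) := by unfold Pre_convert; infer_instance

def pvWitness_convert : String × Int := ("ab", 5)

def Spec_convert (sir : String) (nr : Int) (out : Int) : Prop := out = convert_alt sir nr
instance (sir : String) (nr : Int) (out : Int) : Decidable (Spec_convert sir nr out) := by unfold Spec_convert; infer_instance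

-- ===== CLAIM (what is proved, stated in full; the proofs are below) =====
def Claim_equal_convert : Prop := ∀ (sir : String) (nr : Int), Dom_convert sir nr → Pre_convert sir nr → Spec_convert sir nr (convert sir nr)

-- ===== LEMMAS AND PROOFS =====

-- A's interleaved loop equals result + mult * (little-endian value of B's digit list)
theorem convertLoopA_eq_digits (L nr result mult : Int) :
    convertLoopA L nr result mult
      = result + mult * (digitsLoopB L nr).foldr (fun d r => r * 10 + d) 0 := by
  by_cases h : 0 < nr ∧ 2 ≤ L
  · rw [convertLoopA, digitsLoopB, dif_pos h, dif_pos h, List.foldr_cons,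
      convertLoopA_eq_digits]
    ring
  · rw [convertLoopA, digitsLoopB, dif_neg h, dif_neg h]
    simp
termination_by nr.toNat
decreasing_by exact pv_floordiv_toNat_lt _ _ h.1 h.2

-- ===== VERDICT (by name: the statement is the Claim_ definition above) =====
theorem convert_spec : Claim_equal_convert := by
  intro sir nr _ _
  show convert sir nr = convert_alt sir nr
  rw [convert, convert_alt, List.foldl_reverse, convertLoopA_eq_digits]
  ring
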